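-- pv_equiv track=rewrite | github.com/k-harada/AtCoder | ADT/20250508/D.py | solve
-- ===== SOURCE A (Python) =====
-- def solve(n, a_list):
--     r_list = [0]
--     for a in a_list:
--         r_list.append((r_list[-1] + a) % 360)
--     r_list_s = sorted(r_list)
--     r_list_s.append(360)
--     res = 0
--     m = len(r_list_s)
--     for i in range(m - 1):
--         res = max(res, r_list_s[i + 1] - r_list_s[i])
--     return res
-- ===== SOURCE B (Python) =====
-- def solve(n, a_list):
--     # bucket presence over the 360 possible residues, then one linear gap scan
--     seen = [False] * 360
--     seen[0] = True
--     cur = 0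
--     for a in a_list:
--         cur = (cur + a) % 360
--         seen[cur] = True
--     res = 0
--     prev = 0
--     for v in range(360):
--         if seen[v]:
--             if v - prev > res:
--                 res = v - prev
--             prev = v
--     return max(res, 360 - prev)
-- ===== Notes on version B (the rewrite author's own statement) =====
-- stated objective: faster
-- what changed: Instead of collecting all prefix-sum residues, sorting them and scanning adjacent differences, B marks each residue in a 360-slot presence array and finds the maximal gap in one linear scan over the 360 buckets (duplicates contribute zero gaps, so only distinct residues matter).
import Mathlib
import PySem

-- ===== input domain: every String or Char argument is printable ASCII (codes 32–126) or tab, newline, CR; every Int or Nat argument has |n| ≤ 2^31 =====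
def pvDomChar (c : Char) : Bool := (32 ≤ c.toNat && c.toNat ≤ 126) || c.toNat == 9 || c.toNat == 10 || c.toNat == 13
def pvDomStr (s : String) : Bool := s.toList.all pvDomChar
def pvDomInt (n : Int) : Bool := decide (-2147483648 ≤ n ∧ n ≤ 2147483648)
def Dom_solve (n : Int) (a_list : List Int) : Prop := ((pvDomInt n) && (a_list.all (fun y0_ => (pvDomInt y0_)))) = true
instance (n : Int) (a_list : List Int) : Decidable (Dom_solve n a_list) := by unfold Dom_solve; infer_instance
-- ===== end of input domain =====

-- B replaces A's sort of the prefix-sum residues by a 360-slot presence array with one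
-- linear gap scan (objective: faster, O(n + 360) instead of O(n log n)).

-- ===== PORT A =====
-- literal port of A: build r_list by appending (last + a) % 360, sort it, append 360,
-- then fold max over adjacent differences indexed by range(m - 1)
def solve (n : Int) (a_list : List Int) : Int :=
  let r_list := a_list.foldl
    (fun rl a => rl ++ [PySem.Int.mod (PySem.List.pyGetD rl (-1) 0 + a) 360]) [0]
  let r_list_s := PySem.List.sorted r_list id ++ [360]
  let m : Int := r_list_s.length
  (PySem.List.pyRange 0 (m - 1) 1).foldl
    (fun res i => max res (PySem.List.pyGetD r_list_s (i + 1) 0 - PySem.List.pyGetD r_list_s i 0)) 0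

-- ===== PORT B =====
-- literal port of B: presence array of the 360 residues, then one scan over range(360)
def solve_alt (n : Int) (a_list : List Int) : Int :=
  let seen0 : List Bool := (List.replicate 360 false).set 0 true
  let sc := a_list.foldl
    (fun (p : List Bool × Int) a =>
      let cur := PySem.Int.mod (p.2 + a) 360
      (PySem.List.pySetD p.1 cur true, cur)) (seen0, 0)
  let rp := (PySem.List.pyRange 0 360 1).foldl
    (fun (rp : Int × Int) v =>
      if PySem.List.pyGetD sc.1 v false then
        (if v - rp.2 > rp.1 then v - rp.2 else rp.1, v)
      else rp) (0, 0)
  max rp.1 (360 - rp.2)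

-- ===== PRECONDITION & SPEC =====
def Spec_solve (n : Int) (a_list : List Int) (out : Int) : Prop := out = solve_alt n a_list
instance (n : Int) (a_list : List Int) (out : Int) : Decidable (Spec_solve n a_list out) := by unfold Spec_solve; infer_instance

-- ===== CLAIM (what is proved, stated in full; the proofs are below) =====
def Claim_equal_solve : Prop := ∀ (n : Int) (a_list : List Int), Dom_solve n a_list → Spec_solve n a_list (solve n a_list)

-- ===== LEMMAS AND PROOFS =====

-- the residue trail appended after the initial 0
def pvPref (c : Int) : List Int → List Int
  | [] => []
  | a :: t => PySem.Int.mod (c + a) 360 :: pvPref (PySem.Int.mod (c + a) 360) t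

-- structural form of both gap loops
def pvGaps (res prev : Int) : List Int → Int
  | [] => res
  | x :: t => pvGaps (max res (x - prev)) x t

-- adjacent dedup (of a sorted list)
def pvDD : List Int → List Int
  | [] => []
  | [x] => [x]
  | x :: y :: t => if x = y then pvDD (y :: t) else x :: pvDD (y :: t)

lemma pvPref_bounds (c : Int) (l : List Int) : ∀ x ∈ pvPref c l, 0 ≤ x ∧ x < 360 := by
  induction l generalizing c with
  | nil => simp [pvPref]
  | cons a t ih =>
    intro x hx
    simp only [pvPref, List.mem_cons] at hx
    rcases hx with hx | hx
    · subst hx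
      exact ⟨PySem.Int.mod_nonneg _ (by norm_num), PySem.Int.mod_lt _ (by norm_num)⟩
    · exact ih _ x hx

-- A's building loop produces rl ++ pvPref (last rl) l
lemma pvAfold (l : List Int) (rl : List Int) (h : rl ≠ []) :
    l.foldl (fun rl a => rl ++ [PySem.Int.mod (PySem.List.pyGetD rl (-1) 0 + a) 360]) rl
      = rl ++ pvPref (rl.getLast h) l := by
  induction l generalizing rl with
  | nil => simp [pvPref]
  | cons a t ih =>
    rw [List.foldl_cons, PySem.List.pyGetD_neg_one rl 0 h,
      ih (rl ++ [PySem.Int.mod (rl.getLast h + a) 360]) (by simp)]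
    simp [pvPref]

-- B's building loop: presence fold + running residue
lemma pvBfold (l : List Int) (s : List Bool) (c : Int) :
    l.foldl (fun (p : List Bool × Int) a =>
        let cur := PySem.Int.mod (p.2 + a) 360
        (PySem.List.pySetD p.1 cur true, cur)) (s, c)
      = ((pvPref c l).foldl (fun s v => PySem.List.pySetD s v true) s, (pvPref c l).getLastD c) := by
  induction l generalizing s c with
  | nil => simp [pvPref]
  | cons a t ih =>
    rw [List.foldl_cons,
      show pvPref c (a :: t)
          = PySem.Int.mod (c + a) 360 :: pvPref (PySem.Int.mod (c + a) 360) t from rfl,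
      List.foldl_cons, List.getLastD_cons]
    exact ih _ _

lemma pvSeen_spec (P : List Int) (s : List Bool) (hs : s.length = 360)
    (hP : ∀ x ∈ P, 0 ≤ x ∧ x < 360) (m : Int) (hm : 0 ≤ m) (hm' : m < 360) :
    PySem.List.pyGetD (P.foldl (fun s v => PySem.List.pySetD s v true) s) m false
      = (PySem.List.pyGetD s m false || decide (m ∈ P)) := by
  induction P generalizing s with
  | nil => simp
  | cons x P' ih =>
    have hx := hP x (by simp)
    rw [List.foldl_cons,
      ih (PySem.List.pySetD s x true) (by rw [PySem.List.length_pySetD]; exact hs)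
        (fun y hy => hP y (by simp [hy]))]
    have e := PySem.List.pyGetD_pySetD_natCast s x.toNat m.toNat true false (by omega)
    have hxc : ((x.toNat : Nat) : Int) = x := by omega
    have hmc : ((m.toNat : Nat) : Int) = m := by omega
    rw [hxc, hmc] at e
    rw [e]
    by_cases h : m.toNat = x.toNat
    · have hmx : m = x := by omega
      simp [hmx, List.mem_cons]
    · have hmx : ¬ (m = x) := by omega
      simp [h, hmx, List.mem_cons]

lemma pvSeen0 (m : Int) (hm : 0 ≤ m) (hm' : m < 360) :
    PySem.List.pyGetD ((List.replicate 360 false).set 0 true) m false = decide (m = 0) := by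
  have hmc : m = ((m.toNat : Nat) : Int) := by omega
  rw [hmc, PySem.List.pyGetD_natCast, List.getD_eq_getElem?_getD, List.getElem?_set,
    List.getElem?_replicate, List.length_replicate]
  by_cases h : m.toNat = 0
  · rw [if_pos h.symm, if_pos (by omega)]
    have h2 : ((m.toNat : Nat) : Int) = 0 := by omega
    simp [h2]
  · rw [if_neg (fun hh => h hh.symm), if_pos (by omega : m.toNat < 360)]
    have h2 : ¬ ((m.toNat : Nat) : Int) = 0 := by omega
    simp
    omega

lemma pvGetD_cons_succ (y : Int) (xs : List Int) (k : Nat) (d : Int) :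
    PySem.List.pyGetD (y :: xs) ((k : Int) + 1) d = PySem.List.pyGetD xs (k : Int) d := by
  have h1 : ((k : Int) + 1) = ((k + 1 : Nat) : Int) := by push_cast; ring
  rw [h1, PySem.List.pyGetD_natCast, PySem.List.pyGetD_natCast, List.getD_cons_succ]

-- A's index fold over adjacent pairs is the structural gap fold
lemma pvIdxfold (t : List Int) (h res : Int) :
    (PySem.List.pyRange 0 (t.length : Int) 1).foldl
        (fun r i => max r (PySem.List.pyGetD (h :: t) (i + 1) 0 - PySem.List.pyGetD (h :: t) i 0)) res
      = pvGaps res h t := by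
  induction t generalizing h res with
  | nil => simp [PySem.List.pyRange_one_eq_nil, pvGaps]
  | cons x t' ih =>
    rw [PySem.List.pyRange_one_cons (by simp), List.foldl_cons]
    simp only [zero_add]
    have e0 : PySem.List.pyGetD (h :: x :: t') (1:Int) 0 = x := by
      have := pvGetD_cons_succ h (x :: t') 0 0
      simpa using this
    have e1 : PySem.List.pyGetD (h :: x :: t') (0:Int) 0 = h := PySem.List.pyGetD_zero_cons _ _ _
    rw [show pvGaps res h (x :: t') = pvGaps (max res (x - h)) x t' from rfl]
    have hlen : ((x :: t').length : Int) = (t'.length : Int) + 1 := by simp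
    rw [hlen]
    rw [PySem.List.pyRange_one 1 ((t'.length : Int) + 1)]
    have := ih x (max res (PySem.List.pyGetD (h :: x :: t') (1:Int) 0 - PySem.List.pyGetD (h :: x :: t') (0:Int) 0))
    rw [PySem.List.pyRange_one 0 (t'.length : Int)] at this
    rw [List.foldl_map] at this ⊢
    rw [e0, e1] at this ⊢
    have harg : (((t'.length : Int) + 1) - 1).toNat = ((t'.length : Int) - 0).toNat := by omega
    rw [harg]
    rw [← this]
    apply List.foldl_ext
    intro r k hk
    have c1 : ((1:Int) + (k:Int)) = ((k:Int)) + 1 := by ring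
    have c2 : ((k:Int) + 1 + 1) = (((k+1:Nat)):Int) + 1 := by push_cast; ring
    rw [c1, c2, pvGetD_cons_succ h (x::t') k 0, pvGetD_cons_succ h (x::t') (k+1) 0]
    push_cast
    ring_nf


lemma pvGaps_append_singleton (l : List Int) (res prev x : Int) :
    pvGaps res prev (l ++ [x]) = max (pvGaps res prev l) (x - l.getLastD prev) := by
  induction l generalizing res prev with
  | nil => simp [pvGaps]
  | cons y t ih => simp only [List.cons_append, pvGaps, List.getLastD_cons]; exact ih _ _

-- duplicates inside a gap fold contribute a 0 gap: pvDD does not change the result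
lemma pvGaps_dd (l : List Int) : ∀ res prev : Int, 0 ≤ res → pvGaps res prev l = pvGaps res prev (pvDD l) := by
  induction l with
  | nil => intro res prev _; rfl
  | cons x t ih =>
    intro res prev hres
    cases t with
    | nil => rfl
    | cons y t' =>
      by_cases hxy : x = y
      · subst hxy
        have h1 : pvGaps res prev (x :: x :: t') = pvGaps res prev (x :: t') := by
          show pvGaps (max (max res (x - prev)) (x - x)) x t' = pvGaps (max res (x - prev)) x t'
          have : max (max res (x - prev)) (x - x) = max res (x - prev) := by omega
          rw [this]
        rw [h1, ih res prev hres, show pvDD (x :: x :: t') = pvDD (x :: t') from by simp [pvDD]]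
      · rw [show pvDD (x :: y :: t') = x :: pvDD (y :: t') from by simp [pvDD, hxy]]
        show pvGaps (max res (x - prev)) x (y :: t') = pvGaps (max res (x - prev)) x (pvDD (y :: t'))
        exact ih _ _ (by omega)

lemma pvDD_mem (l : List Int) (x : Int) : x ∈ pvDD l ↔ x ∈ l := by
  induction l with
  | nil => rfl
  | cons a t ih =>
    cases t with
    | nil => rfl
    | cons b t' =>
      by_cases hab : a = b
      · subst hab
        rw [show pvDD (a :: a :: t') = pvDD (a :: t') from by simp [pvDD], ih]
        simp
      · rw [show pvDD (a :: b :: t') = a :: pvDD (b :: t') from by simp [pvDD, hab]]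
        simp [ih]

lemma pvDD_pairwise (l : List Int) (h : l.Pairwise (· ≤ ·)) : (pvDD l).Pairwise (· < ·) := by
  induction l with
  | nil => exact List.Pairwise.nil
  | cons a t ih =>
    cases t with
    | nil => simp [pvDD]
    | cons b t' =>
      rcases List.pairwise_cons.mp h with ⟨ha, ht⟩
      by_cases hab : a = b
      · rw [show pvDD (a :: b :: t') = pvDD (b :: t') from by simp [pvDD, hab]]
        exact ih ht
      · rw [show pvDD (a :: b :: t') = a :: pvDD (b :: t') from by simp [pvDD, hab]]
        refine List.pairwise_cons.mpr ⟨?_, ih ht⟩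
        intro z hz
        have hz' : z ∈ b :: t' := (pvDD_mem _ _).mp hz
        have hbz : b ≤ z := by
          rcases List.mem_cons.mp hz' with h1 | h1
          · omega
          · exact (List.pairwise_cons.mp ht).1 z h1
        have hab' : a ≤ b := ha b (by simp)
        omega

lemma pvDD_append_singleton (l : List Int) (x : Int) (hx : x ∉ l) :
    pvDD (l ++ [x]) = pvDD l ++ [x] := by
  induction l with
  | nil => rfl
  | cons a t ih =>
    cases t with
    | nil =>
      have : a ≠ x := by intro hh; exact hx (by simp [hh])
      simp [pvDD, this]
    | cons b t' =>
      have hx' : x ∉ b :: t' := fun hh => hx (by simp [hh])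
      by_cases hab : a = b
      · rw [show (a :: b :: t') ++ [x] = a :: ((b :: t') ++ [x]) from rfl,
          show pvDD (a :: (b :: t' ++ [x])) = pvDD (b :: t' ++ [x]) from by simp [pvDD, hab],
          show pvDD (a :: b :: t') = pvDD (b :: t') from by simp [pvDD, hab]]
        exact ih hx'
      · rw [show (a :: b :: t') ++ [x] = a :: ((b :: t') ++ [x]) from rfl,
          show pvDD (a :: (b :: t' ++ [x])) = a :: pvDD (b :: t' ++ [x]) from by simp [pvDD, hab],
          show pvDD (a :: b :: t') = a :: pvDD (b :: t') from by simp [pvDD, hab]]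
        rw [ih hx']
        rfl

lemma pvSorted_lt_ext (l1 l2 : List Int) (h1 : l1.Pairwise (· < ·)) (h2 : l2.Pairwise (· < ·))
    (hm : ∀ x, x ∈ l1 ↔ x ∈ l2) : l1 = l2 := by
  have hp : l1.Perm l2 := (List.perm_ext_iff_of_nodup (h1.imp ne_of_lt) (h2.imp ne_of_lt)).mpr hm
  exact hp.eq_of_pairwise (fun a b _ _ hab hba => by omega) (h1.imp le_of_lt) (h2.imp le_of_lt)

-- B's scan loop as a pair fold
lemma pvBpair (L : List Int) : ∀ res prev : Int,
    L.foldl (fun (rp : Int × Int) v => (if v - rp.2 > rp.1 then v - rp.2 else rp.1, v)) (res, prev)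
      = (pvGaps res prev L, L.getLastD prev) := by
  induction L with
  | nil => intro res prev; rfl
  | cons v t ih =>
    intro res prev
    rw [List.foldl_cons]
    have e : ((if v - (res, prev).2 > (res, prev).1 then v - (res, prev).2 else (res, prev).1, v) : Int × Int)
        = (max res (v - prev), v) := by
      simp only []
      rw [show (if v - prev > res then v - prev else res) = max res (v - prev) from by omega]
    rw [e, show pvGaps res prev (v :: t) = pvGaps (max res (v - prev)) v t from rfl,
      List.getLastD_cons]
    exact ih _ _

-- ===== VERDICT (by name: the statement is the Claim_ definition above) =====
theorem solve_spec : Claim_equal_solve := by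
  unfold Claim_equal_solve Spec_solve
  intro n a _
  simp only [solve, solve_alt]
  -- the multiset of residues A collects (0 first)
  set R : List Int := (0 : Int) :: pvPref 0 a with hR
  have hRb : ∀ x ∈ R, 0 ≤ x ∧ x < 360 := by
    intro x hx
    rcases List.mem_cons.mp hx with hx | hx
    · subst hx; norm_num
    · exact pvPref_bounds 0 a x hx
  -- A's r_list is R
  have hA1 : a.foldl (fun rl a => rl ++ [PySem.Int.mod (PySem.List.pyGetD rl (-1) 0 + a) 360]) [0] = R := by
    rw [pvAfold a [0] (by simp)]; rfl
  rw [hA1]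
  -- the sorted copy
  set s : List Int := PySem.List.sorted R id with hs
  have hs_mem : ∀ x, x ∈ s ↔ x ∈ R := fun x => PySem.List.mem_sorted R id false x
  have hs_pw : s.Pairwise (· ≤ ·) := by
    have := PySem.List.sorted_pairwise R id
    simpa using this
  have h0s : (0 : Int) ∈ s := (hs_mem 0).mpr (by simp [hR])
  obtain ⟨sh, st, hshape⟩ : ∃ sh st, s = sh :: st := by
    cases hcs : s with
    | nil => rw [hcs] at h0s; cases h0s
    | cons sh st => exact ⟨sh, st, rfl⟩
  have hsh : sh = 0 := by
    have hpw := hshape ▸ hs_pw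
    rcases List.mem_cons.mp (hshape ▸ h0s) with h1 | h1
    · omega
    · have h2 : sh ≤ 0 := (List.pairwise_cons.mp hpw).1 0 h1
      have h3 : 0 ≤ sh ∧ sh < 360 := hRb sh ((hs_mem sh).mp (hshape ▸ List.mem_cons_self))
      omega
  -- A's index loop is the structural gap fold over s ++ [360]
  have hlen : (((s ++ [360]).length : Nat) : Int) - 1 = (((st ++ [360]).length : Nat) : Int) := by
    rw [hshape]; simp
  rw [hlen, show s ++ [360] = sh :: (st ++ [360]) from by rw [hshape]; rfl,
    pvIdxfold (st ++ [360]) sh 0]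
  -- B's seen array: lookup is membership in R
  rw [pvBfold a ((List.replicate 360 false).set 0 true) 0]
  have hseen : ∀ v ∈ PySem.List.pyRange 0 360 1,
      PySem.List.pyGetD ((pvPref 0 a).foldl (fun s v => PySem.List.pySetD s v true)
        ((List.replicate 360 false).set 0 true)) v false = decide (v ∈ R) := by
    intro v hv
    have hvr := (PySem.List.mem_pyRange_one).mp hv
    rw [pvSeen_spec (pvPref 0 a) _ (by rw [List.length_set, List.length_replicate]) (pvPref_bounds 0 a) v hvr.1 hvr.2,
      pvSeen0 v hvr.1 hvr.2]
    simp [hR, List.mem_cons]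
  rw [← List.foldl_filter, List.filter_congr hseen]
  set L : List Int := (PySem.List.pyRange 0 360 1).filter (fun v => decide (v ∈ R)) with hL
  rw [pvBpair L 0 0]
  -- B = gaps over L ++ [360]
  rw [show max (pvGaps 0 0 L) (360 - L.getLastD 0) = pvGaps 0 0 (L ++ [360]) from
    (pvGaps_append_singleton L 0 0 360).symm]
  -- bridge: dedup of the sorted list is exactly L
  have hL_pw : L.Pairwise (· < ·) := (PySem.List.pairwise_lt_pyRange_one 0 360).filter _
  have hL_mem : ∀ x, x ∈ L ↔ x ∈ R := by
    intro x
    rw [hL, List.mem_filter, PySem.List.mem_pyRange_one]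
    constructor
    · intro hx; exact of_decide_eq_true hx.2
    · intro hx; exact ⟨⟨(hRb x hx).1, (hRb x hx).2⟩, decide_eq_true hx⟩
  have h360 : (360 : Int) ∉ s := by
    intro hc
    have := hRb 360 ((hs_mem 360).mp hc)
    omega
  have hdd : pvDD s = L := by
    apply pvSorted_lt_ext _ _ (pvDD_pairwise s hs_pw) hL_pw
    intro x
    rw [pvDD_mem, hs_mem, hL_mem]
  have key : pvGaps 0 sh (st ++ [360]) = pvGaps 0 0 (L ++ [360]) := by
    have e1 : pvGaps 0 0 (s ++ [360]) = pvGaps 0 sh (st ++ [360]) := by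
      rw [hshape, hsh]
      show pvGaps (max 0 (0 - 0)) 0 (st ++ [360]) = pvGaps 0 0 (st ++ [360])
      norm_num
    rw [← e1, pvGaps_dd (s ++ [360]) 0 0 le_rfl, pvDD_append_singleton s 360 h360, hdd]
  exact key
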